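-- pv_equiv track=rewrite | github.com/thiefox/sub_decorator | com_utils/StrHandler.py | find_num_diff
-- ===== SOURCE A (Python) =====
-- def find_num_diff(name1 : str, name2 : str) -> tuple :
--     info = (-1, -1)
--     pos = -1
--     begin = end = -1
--     if len(name1) == len(name2) :
--         for i in range(len(name1)):
--             if name1[i] != name2[i] :       #第一个有差异的位置
--                 pos = i
--                 break
--         if pos >= 0 and name1[pos].isdigit() and name2[pos].isdigit() :
--             begin = pos
--             while begin > 0 :
--                 if name1[begin-1].isdigit() and name2[begin-1].isdigit() :
--                     begin -= 1
--                 else :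
--                     break
--             end = pos
--             while end < len(name1) - 1 :
--                 if name1[end+1].isdigit() and name2[end+1].isdigit() :
--                     end += 1
--                 else :
--                     break
--             tail = end + 1
--             while tail < len(name1) :
--                 if name1[tail] == name2[tail] : #后面部分也必须相同
--                     tail += 1
--                 else :
--                     begin = end = -1
--                     break
--             info = (begin, end+1)
--     return info
-- ===== SOURCE B (Python) =====
-- def find_num_diff(name1: str, name2: str) -> tuple:
--     # Strategy: trim to the differing window [p, q] (first/last differing index),
--     # require the whole window to be a both-digit region, then widen the window
--     # outward over the surrounding both-digit run. No tail-equality walk is needed: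
--     # by construction nothing differs outside [p, q].
--     if len(name1) != len(name2):
--         return (-1, -1)
--     pairs = list(zip(name1, name2))
--     p = next((i for i, (a, b) in enumerate(pairs) if a != b), None)
--     if p is None:
--         return (-1, -1)
--     q = len(pairs) - 1
--     while pairs[q][0] == pairs[q][1]:
--         q -= 1
--
--     def digit(ab):
--         return ab[0].isdigit() and ab[1].isdigit()
--
--     if not all(map(digit, pairs[p:q + 1])):
--         return (-1, -1)
--     left = 0
--     for ab in reversed(pairs[:p]):
--         if not digit(ab):
--             break
--         left += 1
--     right = 0
--     for ab in pairs[q + 1:]: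
--         if not digit(ab):
--             break
--         right += 1
--     return (p - left, q + 1 + right)
-- ===== Notes on version B (the rewrite author's own statement) =====
-- stated objective: alternative
-- what changed: A expands a digit run around the first differing index and then walks the tail checking equality; B instead trims both strings to the differing window [first diff, last diff], requires that whole window to be both-digit, and widens it over the surrounding digit run via takeWhile run lengths, so A's tail-equality walk and its expand-then-verify structure disappear.
-- intended difference: On equal-length strings whose first differing position is a digit in both but with a further difference beyond the surrounding common digit run, A returns (-1, 0) (leftover 'end+1' after resetting begin=end=-1); B returns the function's own no-match sentinel (-1, -1), which is the intended value. — e.g. on find_num_diff("a1b", "a2c"): A returns (-1, 0), B returns (-1, -1)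
import Mathlib
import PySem

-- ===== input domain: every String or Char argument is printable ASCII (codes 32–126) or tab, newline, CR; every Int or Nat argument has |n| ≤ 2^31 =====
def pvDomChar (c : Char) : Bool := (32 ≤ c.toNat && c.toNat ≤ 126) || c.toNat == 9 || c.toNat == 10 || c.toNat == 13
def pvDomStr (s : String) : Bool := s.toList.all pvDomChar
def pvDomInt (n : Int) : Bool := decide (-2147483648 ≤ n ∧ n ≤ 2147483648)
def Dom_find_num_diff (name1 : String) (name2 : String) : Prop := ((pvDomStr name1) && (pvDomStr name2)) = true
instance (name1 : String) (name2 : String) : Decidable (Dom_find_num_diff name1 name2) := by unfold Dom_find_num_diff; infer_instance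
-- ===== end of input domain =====

-- B replaces A's expand-around-first-diff + tail-equality walk by a window algorithm: trim to the
-- first/last differing index [p, q], require that whole window to be both-digit, then widen it over
-- the surrounding digit run; on tail-mismatch inputs A's leftover state returns (-1, 0) where B
-- returns the intended (-1, -1) (see D_ below).

-- ===== PORT A =====
-- A's indexed reads happen only at indices its loop guards prove in range; List.getD ' ' is exact there.
def pvPosLoopA : List (Char × Char) → Nat → Int
  | [], _ => -1
  | ab :: t, i => if ab.1 ≠ ab.2 then (i : Int) else pvPosLoopA t (i + 1)

def pvDigAtA (l1 l2 : List Char) (i : Nat) : Bool :=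
  PySem.Chars.isdigit (l1.getD i ' ') && PySem.Chars.isdigit (l2.getD i ' ')

def pvBeginLoopA (l1 l2 : List Char) : Nat → Nat
  | 0 => 0
  | b + 1 => if pvDigAtA l1 l2 b then pvBeginLoopA l1 l2 b else b + 1

-- fuel = number of remaining iterations of the 'while end < len(name1) - 1' loop
def pvEndLoopA (l1 l2 : List Char) : Nat → Nat → Nat
  | e, 0 => e
  | e, f + 1 => if pvDigAtA l1 l2 (e + 1) then pvEndLoopA l1 l2 (e + 1) f else e

-- fuel = len(name1) - tail
def pvTailLoopA (l1 l2 : List Char) : Nat → Nat → Bool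
  | _, 0 => true
  | t, f + 1 => if l1.getD t ' ' = l2.getD t ' ' then pvTailLoopA l1 l2 (t + 1) f else false

def find_num_diff (name1 : String) (name2 : String) : Int × Int :=
  let l1 := name1.toList
  let l2 := name2.toList
  if l1.length = l2.length then
    let pos := pvPosLoopA (l1.zip l2) 0
    if 0 ≤ pos then
      if pvDigAtA l1 l2 pos.toNat then
        let b := pvBeginLoopA l1 l2 pos.toNat
        let e := pvEndLoopA l1 l2 pos.toNat (l1.length - 1 - pos.toNat)
        let tl := pvTailLoopA l1 l2 (e + 1) (l1.length - (e + 1))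
        let be : Int × Int := if tl then ((b : Int), (e : Int)) else (-1, -1)
        (be.1, be.2 + 1)
      else (-1, -1)
    else (-1, -1)
  else (-1, -1)

-- ===== PORT B =====
def pvDigB (ab : Char × Char) : Bool := PySem.Chars.isdigit ab.1 && PySem.Chars.isdigit ab.2

-- next((i for i,(a,b) in enumerate(pairs) if a != b), None)
def pvFirstDiffB : List (Char × Char) → Nat → Option Nat
  | [], _ => none
  | ab :: t, i => if ab.1 ≠ ab.2 then some i else pvFirstDiffB t (i + 1)

-- 'while pairs[q][0] == pairs[q][1]: q -= 1'; a differing pair exists below the start index,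
-- so the loop never walks past 0 and structural recursion on q is exact.
def pvLastDiffB (pairs : List (Char × Char)) : Nat → Nat
  | 0 => 0
  | q + 1 =>
    if (pairs.getD (q + 1) (' ', ' ')).1 = (pairs.getD (q + 1) (' ', ' ')).2 then
      pvLastDiffB pairs q
    else q + 1

def find_num_diff_alt (name1 : String) (name2 : String) : Int × Int :=
  let l1 := name1.toList
  let l2 := name2.toList
  if l1.length ≠ l2.length then (-1, -1)
  else
    let pairs := l1.zip l2
    match pvFirstDiffB pairs 0 with
    | none => (-1, -1)
    | some p =>
      let q := pvLastDiffB pairs (pairs.length - 1)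
      -- all(map(digit, pairs[p:q+1]))  (slice indices in range: p ≤ q < len)
      if ((pairs.drop p).take (q + 1 - p)).all pvDigB then
        -- the two run-length for-loops over reversed(pairs[:p]) and pairs[q+1:]
        let left := ((pairs.take p).reverse.takeWhile pvDigB).length
        let right := ((pairs.drop (q + 1)).takeWhile pvDigB).length
        ((p : Int) - (left : Int), (q : Int) + 1 + (right : Int))
      else (-1, -1)

-- ===== PRECONDITION & SPEC =====
-- predicates D_ uses to describe the input (a pair of aligned characters): both ASCII digits / differing
def pvPairDigit (ab : Char × Char) : Bool := ('0' ≤ ab.1 && ab.1 ≤ '9') && ('0' ≤ ab.2 && ab.2 ≤ '9')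
def pvPairNe (ab : Char × Char) : Bool := ab.1 != ab.2

-- On equal-length strings whose first differing position is a digit in both but where a further
-- difference lies beyond the surrounding common digit run, A's leftover loop state returns (-1, 0)
-- while B returns (-1, -1), the function's own 'no numeric diff' sentinel, which is the intended value.
def D_find_num_diff (name1 : String) (name2 : String) : Prop :=
  (decide (name1.toList.length = name2.toList.length) &&
    (match (name1.toList.zip name2.toList).findIdx? pvPairNe with
     | none => false
     | some pos =>
       pvPairDigit ((name1.toList.zip name2.toList).getD pos (' ', ' ')) &&
       (((name1.toList.zip name2.toList).drop (pos + 1)).dropWhile pvPairDigit).any pvPairNe)) = true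

instance (name1 : String) (name2 : String) : Decidable (D_find_num_diff name1 name2) := by
  unfold D_find_num_diff; infer_instance

def Spec_find_num_diff (name1 : String) (name2 : String) (out : Int × Int) : Prop :=
  ¬ D_find_num_diff name1 name2 → out = find_num_diff_alt name1 name2
instance (name1 : String) (name2 : String) (out : Int × Int) :
    Decidable (Spec_find_num_diff name1 name2 out) := by
  unfold Spec_find_num_diff; infer_instance

def pvDiffWitness_find_num_diff : String × String := ("a1b", "a2c")
def pvDiffWitnessOut_find_num_diff : (Int × Int) × (Int × Int) := ((-1, 0), (-1, -1))

-- ===== CLAIM (what is proved, stated in full; the proofs are below) =====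
def Claim_unchanged_find_num_diff : Prop := ∀ (name1 : String) (name2 : String), Dom_find_num_diff name1 name2 → Spec_find_num_diff name1 name2 (find_num_diff name1 name2)
def Claim_changed_find_num_diff : Prop := Dom_find_num_diff (pvDiffWitness_find_num_diff.1) (pvDiffWitness_find_num_diff.2) ∧ D_find_num_diff (pvDiffWitness_find_num_diff.1) (pvDiffWitness_find_num_diff.2) ∧ find_num_diff (pvDiffWitness_find_num_diff.1) (pvDiffWitness_find_num_diff.2) = pvDiffWitnessOut_find_num_diff.1 ∧ find_num_diff_alt (pvDiffWitness_find_num_diff.1) (pvDiffWitness_find_num_diff.2) = pvDiffWitnessOut_find_num_diff.2 ∧ pvDiffWitnessOut_find_num_diff.1 ≠ pvDiffWitnessOut_find_num_diff.2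
def Claim_exact_find_num_diff : Prop := ∀ (name1 : String) (name2 : String), Dom_find_num_diff name1 name2 → D_find_num_diff name1 name2 → find_num_diff name1 name2 ≠ find_num_diff_alt name1 name2

-- ===== LEMMAS AND PROOFS =====

theorem pv_zip_getD (l1 l2 : List Char) (hlen : l1.length = l2.length) (k : Nat) :
    (l1.zip l2).getD k (' ', ' ') = (l1.getD k ' ', l2.getD k ' ') := by
  by_cases hk : k < (l1.zip l2).length
  · have h1 : k < l1.length := by simpa [List.length_zip, hlen] using hk
    have h2 : k < l2.length := by omega
    rw [List.getD_eq_getElem _ _ hk, List.getD_eq_getElem _ _ h1,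
      List.getD_eq_getElem _ _ h2, List.getElem_zip]
  · have h1 : l1.length ≤ k := by simp [List.length_zip, hlen] at hk ⊢; omega
    have h2 : l2.length ≤ k := by omega
    rw [List.getD_eq_default _ _ (by simp [List.length_zip]; omega), List.getD_eq_default _ _ h1,
      List.getD_eq_default _ _ h2]

theorem pv_dig_eq (l1 l2 : List Char) (hlen : l1.length = l2.length) (i : Nat) :
    pvPairDigit ((l1.zip l2).getD i (' ', ' ')) = pvDigAtA l1 l2 i := by
  rw [pv_zip_getD l1 l2 hlen]; rfl

theorem pv_pos_first (p : List (Char × Char)) : ∀ i : Nat,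
    pvPosLoopA p i = (match pvFirstDiffB p i with | none => (-1 : Int) | some d => (d : Int)) := by
  induction p with
  | nil => intro i; simp [pvPosLoopA, pvFirstDiffB]
  | cons ab t ih =>
    intro i
    by_cases hab : ab.1 = ab.2
    · simp [pvPosLoopA, pvFirstDiffB, hab, ih (i + 1)]
    · simp [pvPosLoopA, pvFirstDiffB, hab]

theorem pv_first_findIdx (p : List (Char × Char)) : ∀ i : Nat,
    pvFirstDiffB p i = (p.findIdx? pvPairNe).map (fun x => i + x) := by
  induction p with
  | nil => intro i; simp [pvFirstDiffB]
  | cons ab t ih =>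
    intro i
    by_cases hab : ab.1 = ab.2
    · rw [show pvFirstDiffB (ab :: t) i = pvFirstDiffB t (i + 1) from by simp [pvFirstDiffB, hab],
        List.findIdx?_cons, show pvPairNe ab = false from by simp [pvPairNe, hab]]
      rw [if_neg (by simp), ih (i + 1)]
      cases t.findIdx? pvPairNe
      · simp
      · simp; omega
    · rw [show pvFirstDiffB (ab :: t) i = some i from by simp [pvFirstDiffB, hab],
        List.findIdx?_cons, show pvPairNe ab = true from by simp [pvPairNe, hab]]
      simp

theorem pv_first_spec (p : List (Char × Char)) : ∀ (i d : Nat), pvFirstDiffB p i = some d →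
    ∃ k, k < p.length ∧ d = i + k ∧
      (p.getD k (' ', ' ')).1 ≠ (p.getD k (' ', ' ')).2 ∧
      ∀ j, j < k → (p.getD j (' ', ' ')).1 = (p.getD j (' ', ' ')).2 := by
  induction p with
  | nil => intro i d h; simp [pvFirstDiffB] at h
  | cons ab t ih =>
    intro i d h
    by_cases hab : ab.1 = ab.2
    · rw [show pvFirstDiffB (ab :: t) i = pvFirstDiffB t (i + 1) from by
        simp [pvFirstDiffB, hab]] at h
      obtain ⟨k, hk, rfl, hne, hprev⟩ := ih (i + 1) d h
      refine ⟨k + 1, by simp; omega, by omega, by simpa using hne, ?_⟩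
      intro j hj
      cases j with
      | zero => simpa using hab
      | succ j => simpa using hprev j (by omega)
    · rw [show pvFirstDiffB (ab :: t) i = some i from by simp [pvFirstDiffB, hab]] at h
      obtain rfl : i = d := by injection h
      exact ⟨0, by simp, by omega, by simpa using hab, fun j hj => absurd hj (Nat.not_lt_zero j)⟩

theorem pv_last_spec (p : List (Char × Char)) : ∀ Q : Nat,
    (∃ j, j ≤ Q ∧ (p.getD j (' ', ' ')).1 ≠ (p.getD j (' ', ' ')).2) →
    (p.getD (pvLastDiffB p Q) (' ', ' ')).1 ≠ (p.getD (pvLastDiffB p Q) (' ', ' ')).2 ∧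
    pvLastDiffB p Q ≤ Q ∧
    ∀ j, pvLastDiffB p Q < j → j ≤ Q →
      (p.getD j (' ', ' ')).1 = (p.getD j (' ', ' ')).2 := by
  intro Q
  induction Q with
  | zero =>
    rintro ⟨j, hj, hne⟩
    have : j = 0 := by omega
    subst this
    exact ⟨by simpa [pvLastDiffB] using hne, le_rfl, by omega⟩
  | succ Q ih =>
    rintro ⟨j, hj, hne⟩
    by_cases heq : (p.getD (Q + 1) (' ', ' ')).1 = (p.getD (Q + 1) (' ', ' ')).2
    · have hj' : j ≤ Q := by
        rcases Nat.lt_or_ge j (Q + 1) with h | h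
        · omega
        · exact absurd (by rw [show j = Q + 1 from by omega]; exact heq) hne
      rw [show pvLastDiffB p (Q + 1) = pvLastDiffB p Q from by simp only [pvLastDiffB]; rw [if_pos heq]]
      obtain ⟨h1, h2, h3⟩ := ih ⟨j, hj', hne⟩
      refine ⟨h1, by omega, fun j' hgt hle => ?_⟩
      rcases Nat.lt_or_ge j' (Q + 1) with h | h
      · exact h3 j' hgt (by omega)
      · rw [show j' = Q + 1 from by omega]; exact heq
    · rw [show pvLastDiffB p (Q + 1) = Q + 1 from by simp only [pvLastDiffB]; rw [if_neg heq]]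
      exact ⟨heq, le_rfl, by omega⟩

theorem pv_begin_left (l1 l2 : List Char) (hlen : l1.length = l2.length) : ∀ b : Nat,
    b ≤ (l1.zip l2).length →
    ((((l1.zip l2).take b).reverse).takeWhile pvPairDigit).length ≤ b ∧
    pvBeginLoopA l1 l2 b =
      b - (((l1.zip l2).take b).reverse.takeWhile pvPairDigit).length := by
  intro b
  induction b with
  | zero => intro _; simp [pvBeginLoopA]
  | succ b ih =>
    intro hb
    have hblt : b < (l1.zip l2).length := by omega
    obtain ⟨ih1, ih2⟩ := ih (by omega)
    have htake : ((l1.zip l2).take (b + 1)).reverse =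
        (l1.zip l2)[b] :: ((l1.zip l2).take b).reverse := by
      rw [List.take_succ, List.getElem?_eq_getElem hblt]
      simp
    have hgd : (l1.zip l2)[b] = (l1.zip l2).getD b (' ', ' ') :=
      (List.getD_eq_getElem _ _ hblt).symm
    rw [htake, hgd, List.takeWhile_cons, pv_dig_eq l1 l2 hlen]
    by_cases hdig : pvDigAtA l1 l2 b = true
    · rw [if_pos hdig]
      simp only [List.length_cons]
      constructor
      · omega
      · rw [show pvBeginLoopA l1 l2 (b + 1) = pvBeginLoopA l1 l2 b from by
          simp [pvBeginLoopA, hdig], ih2]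
        omega
    · rw [if_neg hdig]
      simp only [List.length_nil]
      exact ⟨by omega, by simp [pvBeginLoopA, hdig]⟩

theorem pv_end_tw (l1 l2 : List Char) (hlen : l1.length = l2.length) : ∀ (fuel e : Nat),
    e < l1.length → fuel = l1.length - 1 - e →
    pvEndLoopA l1 l2 e fuel =
      e + (((l1.zip l2).drop (e + 1)).takeWhile pvPairDigit).length := by
  intro fuel
  induction fuel with
  | zero =>
    intro e he hf
    have : l1.length ≤ e + 1 := by omega
    rw [List.drop_eq_nil_of_le (by simp [List.length_zip, hlen]; omega)]
    simp [pvEndLoopA]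
  | succ f ih =>
    intro e he hf
    have he1 : e + 1 < (l1.zip l2).length := by simp [List.length_zip, hlen]; omega
    have hdrop : (l1.zip l2).drop (e + 1) =
        (l1.zip l2).getD (e + 1) (' ', ' ') :: (l1.zip l2).drop (e + 2) := by
      rw [List.getD_eq_getElem _ _ he1]
      exact List.drop_eq_getElem_cons he1
    rw [hdrop, List.takeWhile_cons, pv_dig_eq l1 l2 hlen]
    by_cases hdig : pvDigAtA l1 l2 (e + 1) = true
    · rw [if_pos hdig,
        show pvEndLoopA l1 l2 e (f + 1) = pvEndLoopA l1 l2 (e + 1) f from by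
          simp [pvEndLoopA, hdig],
        ih (e + 1) (by simp [List.length_zip, hlen] at he1; omega) (by omega),
        show e + 1 + 1 = e + 2 from rfl]
      simp only [List.length_cons]
      omega
    · rw [if_neg hdig]
      simp [pvEndLoopA, hdig]

theorem pv_dropWhile_drop {α : Type} (p : α → Bool) : ∀ l : List α,
    l.dropWhile p = l.drop (l.takeWhile p).length := by
  intro l
  induction l with
  | nil => simp
  | cons a t ih =>
    rw [List.dropWhile_cons, List.takeWhile_cons]
    by_cases ha : p a = true
    · rw [if_pos ha, if_pos ha]; simpa using ih
    · rw [if_neg ha, if_neg ha]; simp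

theorem pv_tw_len_le {α : Type} (p : α → Bool) : ∀ l : List α,
    (l.takeWhile p).length ≤ l.length := by
  intro l
  induction l with
  | nil => simp
  | cons a t ih =>
    rw [List.takeWhile_cons]
    by_cases ha : p a = true
    · rw [if_pos ha]; simpa using ih
    · rw [if_neg ha]; simp

theorem pv_tw_stop {α : Type} (p : α → Bool) (d0 : α) : ∀ (l : List α) (m : Nat),
    m < l.length → p (l.getD m d0) = false → (l.takeWhile p).length ≤ m := by
  intro l
  induction l with
  | nil => intro m hm; simp at hm
  | cons a t ih =>
    intro m hm hp
    rw [List.takeWhile_cons]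
    cases m with
    | zero => simp at hp; simp [hp]
    | succ m =>
      by_cases ha : p a = true
      · rw [if_pos ha]
        simpa using Nat.succ_le_succ (ih m (by simp at hm; omega) (by simpa using hp))
      · rw [if_neg ha]; simp

theorem pv_tail_iff (l1 l2 : List Char) : ∀ (fuel t : Nat), fuel = l1.length - t →
    (pvTailLoopA l1 l2 t fuel = true ↔
      ∀ j, t ≤ j → j < l1.length → l1.getD j ' ' = l2.getD j ' ') := by
  intro fuel
  induction fuel with
  | zero =>
    intro t ht
    constructor
    · intro _ j hj1 hj2; omega
    · intro _; simp [pvTailLoopA]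
  | succ f ih =>
    intro t ht
    have htn : t < l1.length := by omega
    simp only [pvTailLoopA]
    by_cases hc : l1.getD t ' ' = l2.getD t ' '
    · rw [if_pos hc, ih (t + 1) (by omega)]
      constructor
      · intro h j hj1 hj2
        rcases Nat.eq_or_lt_of_le hj1 with rfl | hlt
        · exact hc
        · exact h j hlt hj2
      · intro h j hj1 hj2
        exact h j (by omega) hj2
    · rw [if_neg hc]
      exact iff_of_false (by simp) (fun h => hc (h t le_rfl htn))

theorem pv_any_iff (l : List (Char × Char)) :
    (l.any pvPairNe = true) ↔
      ∃ i, i < l.length ∧ (l.getD i (' ', ' ')).1 ≠ (l.getD i (' ', ' ')).2 := by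
  induction l with
  | nil => simp
  | cons ab t ih =>
    simp only [List.any_cons, Bool.or_eq_true, ih]
    constructor
    · rintro (h | ⟨i, hi, hne⟩)
      · exact ⟨0, by simp, by simpa [pvPairNe] using h⟩
      · exact ⟨i + 1, by simp; omega, by simpa using hne⟩
    · rintro ⟨i, hi, hne⟩
      cases i with
      | zero => left; simp at hne; simpa [pvPairNe] using hne
      | succ i => right; exact ⟨i, by simp at hi; omega, by simpa using hne⟩

theorem pv_drop_getD (p : List (Char × Char)) (m i : Nat) :
    (p.drop m).getD i (' ', ' ') = p.getD (m + i) (' ', ' ') := by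
  by_cases h : i < (p.drop m).length
  · have h2 : m + i < p.length := by simp [List.length_drop] at h; omega
    rw [List.getD_eq_getElem _ _ h, List.getD_eq_getElem _ _ h2]
    exact List.getElem_drop ..
  · have h2 : p.length ≤ m + i := by simp [List.length_drop] at h; omega
    rw [List.getD_eq_default _ _ (by simp [List.length_drop] at h ⊢; omega),
      List.getD_eq_default _ _ h2]

theorem pv_any_drop (p : List (Char × Char)) (m : Nat) :
    (((p.drop m).any pvPairNe) = true) ↔
      ∃ j, m ≤ j ∧ j < p.length ∧ (p.getD j (' ', ' ')).1 ≠ (p.getD j (' ', ' ')).2 := by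
  rw [pv_any_iff]
  constructor
  · rintro ⟨i, hi, hne⟩
    rw [pv_drop_getD] at hne
    exact ⟨m + i, by omega, by simp [List.length_drop] at hi; omega, hne⟩
  · rintro ⟨j, hmj, hjl, hne⟩
    refine ⟨j - m, by simp [List.length_drop]; omega, ?_⟩
    rw [pv_drop_getD, show m + (j - m) = j from by omega]
    exact hne

-- the window [d+1, q] is all both-digit → A's forward run from d reaches exactly q + right
theorem pv_tw_split (p : List (Char × Char)) (pr : Char × Char → Bool) (d q : Nat)
    (hdq : d ≤ q) (hq : q < p.length)
    (hall : ∀ ab ∈ (p.drop (d + 1)).take (q - d), pr ab = true) :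
    ((p.drop (d + 1)).takeWhile pr).length =
      (q - d) + ((p.drop (q + 1)).takeWhile pr).length := by
  have hdd : (p.drop (d + 1)).drop (q - d) = p.drop (q + 1) := by
    rw [List.drop_drop]; congr 1; omega
  have hlen' : ((p.drop (d + 1)).take (q - d)).length = q - d := by
    simp [List.length_take, List.length_drop]; omega
  calc ((p.drop (d + 1)).takeWhile pr).length
      = (((p.drop (d + 1)).take (q - d) ++ (p.drop (d + 1)).drop (q - d)).takeWhile pr).length := by
        rw [List.take_append_drop]
    _ = ((p.drop (d + 1)).take (q - d)).length +
        (((p.drop (d + 1)).drop (q - d)).takeWhile pr).length := by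
        rw [List.takeWhile_append_of_pos hall, List.length_append]
    _ = (q - d) + ((p.drop (q + 1)).takeWhile pr).length := by rw [hlen', hdd]

theorem pv_main (name1 name2 : String) :
    (¬ D_find_num_diff name1 name2 ∧ find_num_diff name1 name2 = find_num_diff_alt name1 name2) ∨
    (D_find_num_diff name1 name2 ∧ find_num_diff name1 name2 = (-1, 0) ∧
      find_num_diff_alt name1 name2 = (-1, -1)) := by
  simp only [find_num_diff, find_num_diff_alt, D_find_num_diff,
    show pvDigB = pvPairDigit from rfl]
  generalize name1.toList = L1
  generalize name2.toList = L2
  by_cases hlen : L1.length = L2.length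
  case neg =>
    left
    constructor
    · intro hD; simp [hlen] at hD
    · rw [if_neg hlen, if_pos hlen]
  case pos =>
  have hplen : (L1.zip L2).length = L1.length := by simp [List.length_zip, hlen]
  set P := L1.zip L2 with hP
  cases hfd : pvFirstDiffB P 0 with
  | none =>
    left
    have hpos : pvPosLoopA P 0 = -1 := by rw [pv_pos_first, hfd]
    have hfind : P.findIdx? pvPairNe = none := by
      have h := pv_first_findIdx P 0
      rw [hfd] at h
      simpa using h.symm
    constructor
    · intro hD; rw [hfind] at hD; simp at hD
    · rw [if_pos hlen, hpos,
        if_neg (by decide : ¬ (0 : Int) ≤ -1), if_neg (not_not_intro hlen)]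
  | some d =>
    have hfind : P.findIdx? pvPairNe = some d := by
      have h := pv_first_findIdx P 0
      rw [hfd] at h
      cases hf : P.findIdx? pvPairNe with
      | none => rw [hf] at h; simp at h
      | some x => rw [hf] at h; simp at h; rw [show x = d from by omega]
    obtain ⟨k, hk, hdk, hdne, hdfirst⟩ := pv_first_spec P 0 d hfd
    have hdk' : d = k := by omega
    subst hdk'
    clear hdk
    have hdn : d < L1.length := by omega
    have hpos : pvPosLoopA P 0 = (d : Int) := by rw [pv_pos_first, hfd]
    -- the last differing index q
    have hQ := pv_last_spec P (P.length - 1) ⟨d, by omega, hdne⟩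
    set q := pvLastDiffB P (P.length - 1) with hq
    obtain ⟨hqne, hqle, hqlast⟩ := hQ
    have hdq : d ≤ q := by
      by_contra h
      exact hdne (hqlast d (by omega) (by omega))
    have hqn : q < L1.length := by omega
    -- window membership ↔ index form
    have hwin_idx : ∀ ab ∈ (P.drop (d + 1)).take (q - d), ∃ m, d + 1 ≤ m ∧ m ≤ q ∧
        ab = P.getD m (' ', ' ') := by
      intro ab hab
      obtain ⟨m, hm, hab'⟩ := List.mem_iff_getElem.mp hab
      have hm' : m < q - d := by
        have := List.length_take_le (q - d) (P.drop (d + 1)); omega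
      have hmlt : d + 1 + m < P.length := by omega
      refine ⟨d + 1 + m, by omega, by omega, ?_⟩
      rw [← hab']
      rw [List.getElem_take, List.getElem_drop, List.getD_eq_getElem _ _ hmlt]
    by_cases hdig : pvDigAtA L1 L2 d = true
    case neg =>
      -- first differing pair is not a both-digit pair: both sides return (-1, -1)
      left
      have hdigP : pvPairDigit (P.getD d (' ', ' ')) = false := by
        rw [pv_dig_eq L1 L2 hlen]; simpa using hdig
      constructor
      · intro hD
        rw [hfind] at hD
        simp only [Bool.and_eq_true, decide_eq_true_eq] at hD
        rw [hdigP] at hD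
        simp at hD
      · have hwinfalse : ¬ ((P.drop d).take (q + 1 - d)).all pvPairDigit = true := by
          intro hall
          rw [List.all_eq_true] at hall
          have hmem : P.getD d (' ', ' ') ∈ (P.drop d).take (q + 1 - d) := by
            have hdP : d < P.length := by omega
            have : ((P.drop d).take (q + 1 - d)).length = q + 1 - d := by
              simp [List.length_take, List.length_drop]; omega
            rw [List.mem_iff_getElem]
            refine ⟨0, by omega, ?_⟩
            rw [List.getElem_take, List.getElem_drop, List.getD_eq_getElem _ _ (by omega)]
            simp
          have := hall _ hmem
          rw [hdigP] at this; simp at this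
        rw [if_pos hlen, hpos, if_pos (Int.natCast_nonneg d), Int.toNat_natCast,
          if_neg hdig, if_neg (not_not_intro hlen)]
        simp only []
        rw [if_neg hwinfalse]
    case pos =>
      have hdigP : pvPairDigit (P.getD d (' ', ' ')) = true := by
        rw [pv_dig_eq L1 L2 hlen]; exact hdig
      -- A's end value in takeWhile form
      have hE := pv_end_tw L1 L2 hlen (L1.length - 1 - d) d hdn rfl
      set tw := ((P.drop (d + 1)).takeWhile pvPairDigit).length with htw
      -- dropWhile after the run  =  drop (E+1)
      have hdw : (P.drop (d + 1)).dropWhile pvPairDigit = P.drop (d + 1 + tw) := by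
        rw [pv_dropWhile_drop, ← htw, List.drop_drop]
      by_cases hwin : ((P.drop d).take (q + 1 - d)).all pvPairDigit = true
      case pos =>
        -- window all both-digit: B returns the span; A's tail walk succeeds and agrees
        left
        have hwin' : ∀ ab ∈ (P.drop (d + 1)).take (q - d), pvPairDigit ab = true := by
          intro ab hab
          obtain ⟨m, hm1, hm2, rfl⟩ := hwin_idx ab hab
          rw [List.all_eq_true] at hwin
          apply hwin
          have hmP : m < P.length := by omega
          have : ((P.drop d).take (q + 1 - d)).length = q + 1 - d := by
            simp [List.length_take, List.length_drop]; omega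
          rw [List.mem_iff_getElem]
          refine ⟨m - d, by omega, ?_⟩
          rw [List.getElem_take, List.getElem_drop, List.getD_eq_getElem _ _ hmP]
          congr 1
          omega
        have htwsplit := pv_tw_split P pvPairDigit d q hdq (by omega) hwin'
        rw [← htw] at htwsplit
        set right := ((P.drop (q + 1)).takeWhile pvPairDigit).length with hright
        have hrightle : right ≤ P.length - (q + 1) := by
          have := pv_tw_len_le pvPairDigit (P.drop (q + 1))
          simp [List.length_drop] at this
          omega
        have hEval : pvEndLoopA L1 L2 d (L1.length - 1 - d) = q + right := by
          rw [hE, htwsplit]; omega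
        -- no pair differs beyond q, hence none beyond E = q + right
        have hnodiff : ∀ j, q < j → j < P.length →
            (P.getD j (' ', ' ')).1 = (P.getD j (' ', ' ')).2 := by
          intro j hj1 hj2
          exact hqlast j hj1 (by omega)
        constructor
        · intro hD
          rw [hfind] at hD
          simp only [Bool.and_eq_true, decide_eq_true_eq] at hD
          obtain ⟨-, -, hany⟩ := hD
          rw [hdw] at hany
          obtain ⟨j, hj1, hj2, hne⟩ := (pv_any_drop P (d + 1 + tw)).mp hany
          have hjq : q < j := by
            have h1 : tw = q - d + right := htwsplit
            omega
          exact hne (hnodiff j hjq hj2)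
        · obtain ⟨hleftle, hbeq⟩ := pv_begin_left L1 L2 hlen d
            (by have h2 : (L1.zip L2).length = L1.length := by simp [List.length_zip, hlen]
                omega)
          set left := (((P.take d).reverse).takeWhile pvPairDigit).length with hleft
          have htail : pvTailLoopA L1 L2 (q + right + 1) (L1.length - (q + right + 1)) = true := by
            rw [pv_tail_iff L1 L2 _ _ rfl]
            intro j hj1 hj2
            have h := hnodiff j (by omega) (by omega)
            rw [pv_zip_getD L1 L2 hlen] at h
            simpa using h
          rw [if_pos hlen, hpos, if_pos (Int.natCast_nonneg d), Int.toNat_natCast,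
            if_pos hdig, if_neg (not_not_intro hlen)]
          simp only []
          rw [if_pos hwin, hEval, if_pos htail]
          refine Prod.ext ?_ ?_
          · show (pvBeginLoopA L1 L2 d : Int) = (d : Int) - (left : Int)
            rw [hbeq]
            omega
          · show ((q + right : Nat) : Int) + 1 = (q : Int) + 1 + (right : Int)
            push_cast
            ring
      case neg =>
        -- window not all both-digit: a differing pair survives beyond the digit run
        right
        -- a failing window index k with d < k ≤ q
        have hex : ∃ k, d + 1 ≤ k ∧ k ≤ q ∧ pvPairDigit (P.getD k (' ', ' ')) = false := by
          rw [List.all_eq_true] at hwin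
          push_neg at hwin
          obtain ⟨ab, hmem, hfail⟩ := hwin
          obtain ⟨m, hm, hab'⟩ := List.mem_iff_getElem.mp hmem
          have hm' : m < q + 1 - d := by
            have := List.length_take_le (q + 1 - d) (P.drop d); omega
          have hmlt : d + m < P.length := by omega
          have habv : ab = P.getD (d + m) (' ', ' ') := by
            rw [← hab', List.getElem_take, List.getElem_drop, List.getD_eq_getElem _ _ hmlt]
          have hmne : m ≠ 0 := by
            intro h0
            subst h0
            rw [habv, show d + 0 = d from rfl, hdigP] at hfail
            exact hfail rfl
          refine ⟨d + m, by omega, by omega, ?_⟩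
          rw [← habv]
          simpa using hfail
        obtain ⟨k, hk1, hk2, hkfail⟩ := hex
        have htwle : tw ≤ k - (d + 1) := by
          rw [htw]
          apply pv_tw_stop pvPairDigit (' ', ' ')
          · simp [List.length_drop]; omega
          · rw [pv_drop_getD, show d + 1 + (k - (d + 1)) = k from by omega]
            exact hkfail
        have hElt : d + tw < q := by omega
        have hqne' : L1.getD q ' ' ≠ L2.getD q ' ' := by
          have h := hqne
          rw [pv_zip_getD L1 L2 hlen] at h
          simpa using h
        have htl : pvTailLoopA L1 L2 (d + tw + 1) (L1.length - (d + tw + 1)) = false := by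
          rw [Bool.eq_false_iff]
          intro h
          rw [pv_tail_iff L1 L2 _ _ rfl] at h
          exact hqne' (h q (by omega) (by omega))
        refine ⟨?_, ?_, ?_⟩
        · rw [hfind]
          simp only [Bool.and_eq_true, decide_eq_true_eq]
          refine ⟨hlen, hdigP, ?_⟩
          rw [hdw]
          exact (pv_any_drop P (d + 1 + tw)).mpr ⟨q, by omega, by omega, hqne⟩
        · rw [if_pos hlen, hpos, if_pos (Int.natCast_nonneg d), Int.toNat_natCast,
            if_pos hdig, hE]
          rw [if_neg (by simp [htl])]
          norm_num
        · rw [if_neg (not_not_intro hlen)]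
          simp only []
          rw [if_neg hwin]

-- ===== VERDICT (by name: the statement is the Claim_ definition above) =====
theorem find_num_diff_spec : Claim_unchanged_find_num_diff := by
  intro n1 n2 _ hD
  rcases pv_main n1 n2 with ⟨_, h⟩ | ⟨hd, _, _⟩
  · exact h
  · exact absurd hd hD

theorem find_num_diff_changed : Claim_changed_find_num_diff := by
  unfold Claim_changed_find_num_diff; decide

theorem find_num_diff_tight : Claim_exact_find_num_diff := by
  intro n1 n2 _ hd
  rcases pv_main n1 n2 with ⟨hnd, _⟩ | ⟨_, ha, hb⟩
  · exact absurd hd hnd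
  · rw [ha, hb]; decide
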